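-- pv_equiv track=rewrite | github.com/leratos/Signz-Mind | Klassen/core/code_corrector.py | _reconstruct_except_block
-- ===== SOURCE A (Python) =====
-- from typing import Any, Dict, List, Literal, Optional, TYPE_CHECKING, Tuple, Union
--
-- def _reconstruct_except_block(
--     suggestion_lines: List[str], original_try_indent: str, log_list: List[str]
-- ) -> Optional[str]:
--     temp_except_clause: Optional[str] = None
--     temp_except_body_lines: List[str] = []
--     in_except_block_parsing = False
--     for line_sugg in suggestion_lines:
--         stripped_line = line_sugg.strip()
--         if not stripped_line:
--             if in_except_block_parsing:
--                 temp_except_body_lines.append(line_sugg)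
--             continue
--         if (
--             temp_except_clause is None
--             and stripped_line.startswith("except ")
--             and stripped_line.endswith(":")
--         ):
--             temp_except_clause = stripped_line
--             in_except_block_parsing = True
--         elif in_except_block_parsing:
--             if line_sugg.startswith(" ") or not stripped_line:
--                 temp_except_body_lines.append(line_sugg.lstrip())
--             else:
--                 break
--     if temp_except_clause:
--         reconstructed_list = [f"{original_try_indent}{temp_except_clause.strip()}"]
--         if not any(line.strip() for line in temp_except_body_lines):
--             temp_except_body_lines = ["pass"]
--         body_indent = original_try_indent + "    "
--         for exc_line in temp_except_body_lines:
--             reconstructed_list.append(f"{body_indent}{exc_line}")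
--         return "\n".join(reconstructed_list).rstrip() + "\n"
--     return None
-- ===== SOURCE B (Python) =====
-- from typing import List, Optional
--
--
-- def _reconstruct_except_block(
--     suggestion_lines: List[str], original_try_indent: str, log_list: List[str]
-- ) -> Optional[str]:
--     # One backward pass: `body` is the transformed indented/blank prefix of the
--     # tail of the current suffix; a header line captures it, leftmost wins.
--     body: List[str] = []
--     found = None
--     for line in reversed(suggestion_lines):
--         s = line.strip()
--         if s.startswith("except ") and s.endswith(":"):
--             found = (s, body)
--         if line.startswith(" ") or not s:
--             body = [line if not s else line.lstrip()] + body
--         else: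
--             body = []
--     if found is None:
--         return None
--     clause, body_lines = found
--     if not any(l.strip() for l in body_lines):
--         body_lines = ["pass"]
--     out = [original_try_indent + clause]
--     out += [original_try_indent + "    " + l for l in body_lines]
--     return "\n".join(out).rstrip() + "\n"
-- ===== Notes on version B (the rewrite author's own statement) =====
-- stated objective: alternative
-- what changed: Replaces A's forward stateful scan (clause option, in-block flag, break) with a single right-to-left fold that maintains the transformed indented/blank body-prefix of each suffix's tail and lets the leftmost 'except ...:' header capture it.
import Mathlib
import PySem

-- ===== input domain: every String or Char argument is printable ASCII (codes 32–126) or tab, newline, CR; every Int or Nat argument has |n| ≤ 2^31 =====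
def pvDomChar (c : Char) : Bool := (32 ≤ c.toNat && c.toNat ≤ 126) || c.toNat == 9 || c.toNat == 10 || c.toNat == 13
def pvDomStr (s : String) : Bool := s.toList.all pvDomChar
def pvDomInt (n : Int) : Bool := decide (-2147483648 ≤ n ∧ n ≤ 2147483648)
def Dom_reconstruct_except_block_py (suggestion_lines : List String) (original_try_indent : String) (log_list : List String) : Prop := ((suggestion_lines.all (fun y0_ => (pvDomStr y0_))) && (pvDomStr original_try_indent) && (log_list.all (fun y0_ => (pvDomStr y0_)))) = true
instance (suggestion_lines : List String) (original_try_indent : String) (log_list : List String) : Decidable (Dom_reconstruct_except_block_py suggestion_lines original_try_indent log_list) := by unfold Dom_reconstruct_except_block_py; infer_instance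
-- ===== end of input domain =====

-- B replaces A's forward stateful scan (clause/flag/break) with ONE right-to-left fold whose state is the
-- transformed indented/blank body-prefix of each suffix's tail; objective: alternative — same return value.

-- ===== PORT A =====
-- the for-loop of A: state (temp_except_clause, temp_except_body_lines, in_except_block_parsing); 'break' returns early
def pvALoop : List String → Option String → List String → Bool → Option String × List String
  | [], clause, body, _ => (clause, body)
  | l :: rest, clause, body, inp =>
    let s := PySem.Str.strip l
    if s == "" then
      pvALoop rest clause (if inp then body ++ [l] else body) inp
    else if clause.isNone && PySem.Str.startswith s "except " && PySem.Str.endswith s ":" then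
      pvALoop rest (some s) body true
    else if inp then
      if PySem.Str.startswith l " " || s == "" then
        pvALoop rest clause (body ++ [PySem.Str.lstrip l]) inp
      else
        (clause, body)  -- break
    else
      pvALoop rest clause body inp

def reconstruct_except_block_py (suggestion_lines : List String) (original_try_indent : String) (log_list : List String) : Option String :=
  match pvALoop suggestion_lines none [] false with
  | (some c, body0) =>
    if c == "" then none  -- Python truthiness: 'if temp_except_clause:' is false for the empty string
    else
      let body := if body0.all (fun l => PySem.Str.strip l == "") then ["pass"] else body0
      some (PySem.Str.rstrip (PySem.Str.join "\n"
        ((original_try_indent ++ PySem.Str.strip c) ::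
          body.map (fun l => original_try_indent ++ "    " ++ l))) ++ "\n")
  | (none, _) => none

-- ===== PORT B =====
-- one step of Source B's backward pass: state = (body-prefix of current suffix's tail, leftmost header found so far)
def pvBStep (l : String) (st : List String × Option (String × List String)) :
    List String × Option (String × List String) :=
  let s := PySem.Str.strip l
  let found := if PySem.Str.startswith s "except " && PySem.Str.endswith s ":" then some (s, st.1) else st.2
  let body := if PySem.Str.startswith l " " || s == "" then
      (if s == "" then l else PySem.Str.lstrip l) :: st.1
    else []
  (body, found)

def reconstruct_except_block_py_alt (suggestion_lines : List String) (original_try_indent : String) (log_list : List String) : Option String :=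
  match (suggestion_lines.foldr pvBStep ([], none)).2 with
  | none => none
  | some (clause, body0) =>
    let body := if body0.all (fun l => PySem.Str.strip l == "") then ["pass"] else body0
    some (PySem.Str.rstrip (PySem.Str.join "\n"
      ((original_try_indent ++ clause) ::
        body.map (fun l => original_try_indent ++ "    " ++ l))) ++ "\n")

-- ===== PRECONDITION & SPEC =====
def Spec_reconstruct_except_block_py (suggestion_lines : List String) (original_try_indent : String) (log_list : List String) (out : Option String) : Prop := out = reconstruct_except_block_py_alt suggestion_lines original_try_indent log_list
instance (suggestion_lines : List String) (original_try_indent : String) (log_list : List String) (out : Option String) : Decidable (Spec_reconstruct_except_block_py suggestion_lines original_try_indent log_list out) := by unfold Spec_reconstruct_except_block_py; infer_instance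

-- ===== CLAIM (what is proved, stated in full; the proofs are below) =====
def Claim_equal_reconstruct_except_block_py : Prop := ∀ (suggestion_lines : List String) (original_try_indent : String) (log_list : List String), Dom_reconstruct_except_block_py suggestion_lines original_try_indent log_list → Spec_reconstruct_except_block_py suggestion_lines original_try_indent log_list (reconstruct_except_block_py suggestion_lines original_try_indent log_list)

-- ===== LEMMAS AND PROOFS =====

-- proof-side vocabulary characterising both loops
def pvIsClause (l : String) : Bool :=
  let s := PySem.Str.strip l
  PySem.Str.startswith s "except " && PySem.Str.endswith s ":"

def pvBodyPred (l : String) : Bool :=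
  PySem.Str.startswith l " " || PySem.Str.strip l == ""

def pvBodyLine (l : String) : String :=
  if PySem.Str.strip l == "" then l else PySem.Str.lstrip l

-- dropWhile-through-reverse idempotence, the List Char core of strip (strip s) = strip s
theorem pv_dw_idem (p : Char → Bool) (s : List Char) :
    List.dropWhile p (List.dropWhile p (List.dropWhile p (List.dropWhile p s).reverse).reverse).reverse
    = List.dropWhile p (List.dropWhile p s).reverse := by
  set u := List.dropWhile p s with hu
  set t := List.dropWhile p u.reverse with ht
  rcases eq_or_ne t [] with h | h
  · simp [h]
  · have hu' : u ≠ [] := by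
      intro hc; rw [ht, hc] at h; simp at h
    have h0 : t.reverse ≠ [] := by simpa using h
    have hlast : t.getLast h = u.reverse.getLast (by simpa using hu') := by
      exact (List.dropWhile_suffix p).getLast h
    have hheadp : p (u.head hu') = false := List.head_dropWhile_not p hu'
    have h1 : List.dropWhile p t.reverse = t.reverse := by
      rw [List.dropWhile_eq_self_iff]
      intro hne
      have : t.reverse[0] = t.getLast h := by
        rw [List.getElem_reverse]
        simp [List.getLast_eq_getElem]
      rw [this, hlast, List.getLast_reverse]
      simp [hheadp]
    rw [h1, List.reverse_reverse, ht, List.dropWhile_eq_self_iff]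
    intro hne
    have hne' : List.dropWhile p u.reverse ≠ [] := by rw [← ht]; exact h
    have : (List.dropWhile p u.reverse)[0] = (List.dropWhile p u.reverse).head hne' := by
      simp [List.head_eq_getElem]
    rw [this]
    simp [List.head_dropWhile_not]

theorem pv_strip_idem (s : String) : PySem.Str.strip (PySem.Str.strip s) = PySem.Str.strip s := by
  have h : (PySem.Str.strip (PySem.Str.strip s)).toList = (PySem.Str.strip s).toList := by
    simp [PySem.Chars.strip, PySem.Chars.lstrip, PySem.Chars.rstrip]
    exact pv_dw_idem _ _
  exact String.toList_inj.mp h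

theorem pv_clause_strip_ne_empty (l : String) (hc : pvIsClause l = true) :
    PySem.Str.strip l ≠ "" := by
  simp [pvIsClause] at hc
  intro he
  have : PySem.Chars.strip l.toList = [] := by
    rw [← PySem.Str.toList_strip, he]; rfl
  rw [this] at hc
  simp [PySem.Chars.startswith_iff] at hc

-- body phase of A's loop = takeWhile + map
theorem pvALoop_body (xs : List String) (c : String) (body : List String) :
    pvALoop xs (some c) body true = (some c, body ++ (xs.takeWhile pvBodyPred).map pvBodyLine) := by
  induction xs generalizing body with
  | nil => simp [pvALoop]
  | cons l rest ih =>
    by_cases hs : PySem.Str.strip l = ""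
    · have hp : pvBodyPred l = true := by simp [pvBodyPred, hs]
      have hb : pvBodyLine l = l := by simp [pvBodyLine, hs]
      simp [pvALoop, hs, hp, hb, ih]
    · by_cases hw : PySem.Chars.startswith l.toList [' '] = true
      · have hp : pvBodyPred l = true := by simp [pvBodyPred, hw]
        have hb : pvBodyLine l = PySem.Str.lstrip l := by simp [pvBodyLine, hs]
        simp [pvALoop, hs, hw, hp, hb, ih]
      · have hp : pvBodyPred l = false := by simp [pvBodyPred, hs, hw]
        simp [pvALoop, hs, hw, hp]

-- search phase of A's loop = dropWhile, then the body phase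
theorem pvALoop_find (xs : List String) :
    pvALoop xs none [] false =
      match xs.dropWhile (fun l => !pvIsClause l) with
      | [] => (none, [])
      | l :: rest => (some (PySem.Str.strip l), (rest.takeWhile pvBodyPred).map pvBodyLine) := by
  induction xs with
  | nil => simp [pvALoop]
  | cons l rest ih =>
    by_cases hc : pvIsClause l = true
    · have hs := pv_clause_strip_ne_empty l hc
      have hc' := hc
      simp [pvIsClause] at hc'
      simp [pvALoop, hs, hc, hc'.1, hc'.2, pvALoop_body]
    · have hcb : pvIsClause l = false := by simpa using hc
      have hc' := hcb
      simp [pvIsClause] at hc'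
      by_cases hs : PySem.Str.strip l = ""
      · simp [pvALoop, hs, hcb, ih]
      · simp [pvALoop, hs, hcb, ih]
        intro h1 h2
        exact absurd h2 (by simp [hc' h1])

-- B's backward fold computes exactly (takeWhile body of the list, leftmost clause with its tail's body)
theorem pvBStep_eq (l : String) (st : List String × Option (String × List String)) :
    pvBStep l st =
      ((if pvBodyPred l then pvBodyLine l :: st.1 else []),
       if pvIsClause l then some (PySem.Str.strip l, st.1) else st.2) := by
  simp only [pvBStep, pvIsClause, pvBodyPred, pvBodyLine]
  split_ifs <;> simp_all

theorem pvBFold (xs : List String) :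
    xs.foldr pvBStep ([], none) =
      ((xs.takeWhile pvBodyPred).map pvBodyLine,
       match xs.dropWhile (fun l => !pvIsClause l) with
       | [] => none
       | l :: rest => some (PySem.Str.strip l, (rest.takeWhile pvBodyPred).map pvBodyLine)) := by
  induction xs with
  | nil => simp
  | cons l rest ih =>
    simp only [List.foldr_cons, ih, pvBStep_eq]
    by_cases hc : pvIsClause l <;> by_cases hp : pvBodyPred l <;>
      simp [List.takeWhile_cons, List.dropWhile_cons, hc, hp]

-- ===== VERDICT (by name: the statement is the Claim_ definition above) =====
theorem reconstruct_except_block_py_spec : Claim_equal_reconstruct_except_block_py := by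
  intro suggestion_lines original_try_indent log_list _
  unfold Spec_reconstruct_except_block_py
  unfold reconstruct_except_block_py reconstruct_except_block_py_alt
  rw [pvALoop_find, pvBFold]
  rcases hdrop : suggestion_lines.dropWhile (fun l => !pvIsClause l) with _ | ⟨l, rest⟩
  · simp
  · have hne : suggestion_lines.dropWhile (fun l => !pvIsClause l) ≠ [] := by
      rw [hdrop]; simp
    have hhead : pvIsClause l = true := by
      have h0 := List.head_dropWhile_not (fun l => !pvIsClause l) hne
      have hl : (suggestion_lines.dropWhile (fun l => !pvIsClause l)).head hne = l := by
        simp [hdrop]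
      rw [hl] at h0
      simpa using h0
    have hs := pv_clause_strip_ne_empty l hhead
    simp [hs, pv_strip_idem]
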